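-- pv_equiv track=rewrite | github.com/Mvk122/Leetcode-Solutions | Number of Distinct Averages.py | distinctAverages
-- ===== SOURCE A (Python) =====
-- from typing import List
--
-- def distinctAverages(nums: List[int]) -> int:
--     distinct = set()
--     deleted = set()
--     while len(deleted) < len(nums):
--         min_n = float('inf')
--         min_index = -1
--         max_n = float('-inf')
--         max_index = -1
--         for index, num in enumerate(nums):
--             if index in deleted:
--                 continue
--             if num < min_n:
--                 min_n = num
--                 min_index = index
--             if num > max_n:
--                 max_n = num
--                 max_index = index
--         distinct.add(min_n + max_n)
--         deleted.add(min_index)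
--         deleted.add(max_index)
--     return len(distinct)
-- ===== SOURCE B (Python) =====
-- from typing import List
--
-- def distinctAverages(nums: List[int]) -> int:
--     s = sorted(nums)
--     return len({a + b for a, b in zip(s, reversed(s))})
-- ===== Notes on version B (the rewrite author's own statement) =====
-- stated objective: faster
-- what changed: Replaced the O(n^2) repeated full scans over an index 'deleted' set by a single sort followed by pairing the sorted list with its reverse and collecting the pair sums into one set.
import Mathlib
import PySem

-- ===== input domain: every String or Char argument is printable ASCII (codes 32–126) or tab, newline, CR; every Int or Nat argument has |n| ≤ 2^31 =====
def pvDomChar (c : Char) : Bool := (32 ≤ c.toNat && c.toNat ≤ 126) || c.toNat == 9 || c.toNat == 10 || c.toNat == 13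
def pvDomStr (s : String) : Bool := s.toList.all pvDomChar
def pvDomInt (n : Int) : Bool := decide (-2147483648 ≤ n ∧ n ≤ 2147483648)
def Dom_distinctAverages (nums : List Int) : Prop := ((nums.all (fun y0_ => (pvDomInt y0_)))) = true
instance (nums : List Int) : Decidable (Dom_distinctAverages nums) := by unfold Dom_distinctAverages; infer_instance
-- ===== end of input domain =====

-- B replaces A's repeated min/max scans over a 'deleted' index set by one sort paired
-- with its reverse, collecting the pair sums into a set (objective: faster).


-- ===== PORT A =====
-- 'num < min_n' where min_n starts as float('inf') (`none` plays the infinity)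
def pvLtInf (v : Int) : Option Int → Bool
  | none => true
  | some m => decide (v < m)

-- 'num > max_n' where max_n starts as float('-inf')
def pvGtNegInf (v : Int) : Option Int → Bool
  | none => true
  | some m => decide (m < v)

-- the body of A's inner 'for index, num in enumerate(nums)' scan;
-- state = (min_n, min_index, max_n, max_index)
def pvScanStep (deleted : PySem.Set Int) (st : Option Int × Int × Option Int × Int)
    (p : Int × Int) : Option Int × Int × Option Int × Int :=
  if PySem.Set.contains deleted p.1 then st
  else
    let mn := if pvLtInf p.2 st.1 then (some p.2, p.1) else (st.1, st.2.1)
    let mx := if pvGtNegInf p.2 st.2.2.1 then (some p.2, p.1) else (st.2.2.1, st.2.2.2)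
    (mn.1, mn.2, mx.1, mx.2)

-- A's 'while len(deleted) < len(nums)' loop. Each pass adds at least one new index to
-- 'deleted', so fuel = nums.length is enough for the guard never to cut the loop short
-- (proved below: the invariant forces the remaining count ≤ fuel). 'getD 0' only
-- unwraps the Option: whenever the body runs an undeleted index exists, so min_n/max_n
-- are `some` of the ints Python takes from nums.
def pvLoopA (nums : List Int) (fuel : Nat) (distinct deleted : PySem.Set Int) : Int :=
  match fuel with
  | 0 => PySem.Set.len distinct
  | fuel + 1 =>
    if PySem.Set.len deleted < PySem.List.len nums then
      let r := (PySem.List.enumerate nums).foldl (pvScanStep deleted) (none, -1, none, -1)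
      pvLoopA nums fuel (PySem.Set.add distinct (r.1.getD 0 + r.2.2.1.getD 0))
        (PySem.Set.add (PySem.Set.add deleted r.2.1) r.2.2.2)
    else PySem.Set.len distinct

def distinctAverages (nums : List Int) : Int :=
  pvLoopA nums nums.length PySem.Set.empty PySem.Set.empty

-- ===== PORT B =====
def distinctAverages_alt (nums : List Int) : Int :=
  let s := PySem.List.sorted nums (fun x => x) false
  PySem.Set.len (PySem.Set.ofList (List.zipWith (fun a b => a + b) s s.reverse))

-- ===== PRECONDITION & SPEC =====
def Spec_distinctAverages (nums : List Int) (out : Int) : Prop := out = distinctAverages_alt nums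
instance (nums : List Int) (out : Int) : Decidable (Spec_distinctAverages nums out) := by unfold Spec_distinctAverages; infer_instance

-- ===== CLAIM (what is proved, stated in full; the proofs are below) =====
def Claim_equal_distinctAverages : Prop := ∀ (nums : List Int), Dom_distinctAverages nums → Spec_distinctAverages nums (distinctAverages nums)

-- ===== LEMMAS AND PROOFS =====

lemma pvFoldlMin_le (t : List Int) (a x : Int) (hx : x ∈ a :: t) : List.foldl min a t ≤ x :=
  ((List.min?_eq_some_iff (xs := a :: t)).1 rfl).2 x hx
lemma pvFoldlMax_ge (t : List Int) (a x : Int) (hx : x ∈ a :: t) : x ≤ List.foldl max a t :=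
  ((List.max?_eq_some_iff (xs := a :: t)).1 rfl).2 x hx
lemma pvFoldlMin_mem (t : List Int) (a : Int) : List.foldl min a t ∈ a :: t :=
  List.min?_mem (xs := a :: t) rfl
lemma pvFoldlMax_mem (t : List Int) (a : Int) : List.foldl max a t ∈ a :: t :=
  List.max?_mem (xs := a :: t) rfl

-- the reference sum-set: repeatedly record min+max and drop the scanned occurrences
def pvS : List Int → Finset Int
  | [] => ∅
  | a :: t =>
    let m := t.foldl min a
    let M := t.foldl max a
    insert (m + M) (pvS (if m = M then (a :: t).erase m else ((a :: t).erase m).erase M))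
termination_by l => l.length
decreasing_by
  simp only [List.foldl_attach]
  have hm : ((a :: t).erase (t.foldl min a)).length < (a :: t).length := by
    rw [List.length_erase_of_mem (pvFoldlMin_mem t a)]
    simp
  split
  · exact hm
  · exact lt_of_le_of_lt List.length_erase_le hm

lemma pvS_cons (a : Int) (t : List Int) :
    pvS (a :: t)
      = insert (t.foldl min a + t.foldl max a)
          (pvS (if t.foldl min a = t.foldl max a
                then (a :: t).erase (t.foldl min a)
                else ((a :: t).erase (t.foldl min a)).erase (t.foldl max a))) := by
  rw [pvS]

-- min-half and max-half of A's scan, without the 'deleted' skip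
def pvFoldMin (st : Option Int × Int) (l : List (Int × Int)) : Option Int × Int :=
  l.foldl (fun s p => if pvLtInf p.2 s.1 then (some p.2, p.1) else s) st
def pvFoldMax (st : Option Int × Int) (l : List (Int × Int)) : Option Int × Int :=
  l.foldl (fun s p => if pvGtNegInf p.2 s.1 then (some p.2, p.1) else s) st

-- the remaining (index, value) pairs of A's state
def pvRem (nums : List Int) (deleted : PySem.Set Int) : List (Int × Int) :=
  (PySem.List.enumerate nums).filter (fun p => !PySem.Set.contains deleted p.1)

def pvFirstIdxMin (l : List (Int × Int)) (v : Int) : Int :=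
  ((l.find? (fun p => decide (p.2 ≤ v))).getD (0, 0)).1
def pvFirstIdxMax (l : List (Int × Int)) (v : Int) : Int :=
  ((l.find? (fun p => decide (v ≤ p.2))).getD (0, 0)).1

lemma pvScan_skip (deleted : PySem.Set Int) :
    ∀ (l : List (Int × Int)) (st : Option Int × Int × Option Int × Int),
    l.foldl (pvScanStep deleted) st
      = (l.filter (fun p => !PySem.Set.contains deleted p.1)).foldl (pvScanStep deleted) st := by
  intro l
  induction l with
  | nil => intro st; rfl
  | cons p l ih =>
    intro st
    by_cases h : PySem.Set.contains deleted p.1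
    · have hstep : pvScanStep deleted st p = st := by
        unfold pvScanStep; rw [if_pos h]
      simp only [List.foldl_cons, List.filter_cons, h, Bool.not_true, hstep]
      simpa using ih st
    · simp only [List.foldl_cons, List.filter_cons, eq_false_of_ne_true h, Bool.not_false]
      simpa using ih (pvScanStep deleted st p)

lemma pvScan_split :
    ∀ (l : List (Int × Int)) (deleted : PySem.Set Int)
      (a : Option Int) (b : Int) (c : Option Int) (d : Int),
    (∀ p ∈ l, PySem.Set.contains deleted p.1 = false) →
    l.foldl (pvScanStep deleted) (a, b, c, d)
      = ((pvFoldMin (a, b) l).1, (pvFoldMin (a, b) l).2,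
         (pvFoldMax (c, d) l).1, (pvFoldMax (c, d) l).2) := by
  intro l
  induction l with
  | nil => intro deleted a b c d _; rfl
  | cons p l ih =>
    intro deleted a b c d hall
    have hp := hall p (by simp)
    have hstep : pvScanStep deleted (a, b, c, d) p
        = ((if pvLtInf p.2 a then (some p.2, p.1) else (a, b)).1,
           (if pvLtInf p.2 a then (some p.2, p.1) else (a, b)).2,
           (if pvGtNegInf p.2 c then (some p.2, p.1) else (c, d)).1,
           (if pvGtNegInf p.2 c then (some p.2, p.1) else (c, d)).2) := by
      unfold pvScanStep; rw [if_neg (by simp only [hp]; exact Bool.false_ne_true)]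
    have hmin : pvFoldMin (a, b) (p :: l)
        = pvFoldMin (if pvLtInf p.2 a then (some p.2, p.1) else (a, b)) l := by
      simp [pvFoldMin]
    have hmax : pvFoldMax (c, d) (p :: l)
        = pvFoldMax (if pvGtNegInf p.2 c then (some p.2, p.1) else (c, d)) l := by
      simp [pvFoldMax]
    rw [List.foldl_cons, hstep, hmin, hmax]
    rw [ih deleted _ _ _ _ (fun q hq => hall q (by simp [hq]))]

lemma pvFoldMin_spec :
    ∀ (t : List (Int × Int)) (m : Int) (i : Int),
    pvFoldMin (some m, i) t
      = (some ((t.map Prod.snd).foldl min m),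
         if (t.map Prod.snd).foldl min m < m
           then pvFirstIdxMin t ((t.map Prod.snd).foldl min m) else i) := by
  intro t
  induction t with
  | nil => intro m i; simp [pvFoldMin]
  | cons p t ih =>
    intro m i
    have hle : (t.map Prod.snd).foldl min (min m p.2) ≤ min m p.2 :=
      pvFoldlMin_le _ _ _ (by simp)
    by_cases hp : p.2 < m
    · have h1 : pvFoldMin (some m, i) (p :: t) = pvFoldMin (some p.2, p.1) t := by
        simp [pvFoldMin, pvLtInf, hp]
      rw [h1, ih]
      have hmin : min m p.2 = p.2 := by omega
      rw [List.map_cons, List.foldl_cons, hmin]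
      have hv : (t.map Prod.snd).foldl min p.2 ≤ p.2 := by rw [← hmin]; exact hle
      by_cases hvp : (t.map Prod.snd).foldl min p.2 < p.2
      · have h2 : ¬ (p.2 ≤ (t.map Prod.snd).foldl min p.2) := by omega
        simp [pvFirstIdxMin, h2, hvp, show (t.map Prod.snd).foldl min p.2 < m by omega]
      · have hv2 : (t.map Prod.snd).foldl min p.2 = p.2 := by omega
        simp [pvFirstIdxMin, hv2, hp]
    · have h1 : pvFoldMin (some m, i) (p :: t) = pvFoldMin (some m, i) t := by
        simp [pvFoldMin, pvLtInf, hp]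
      rw [h1, ih]
      have hmin : min m p.2 = m := by omega
      rw [List.map_cons, List.foldl_cons, hmin]
      by_cases hvm : (t.map Prod.snd).foldl min m < m
      · have h2 : ¬ (p.2 ≤ (t.map Prod.snd).foldl min m) := by omega
        simp [pvFirstIdxMin, h2, hvm]
      · simp [hvm]

lemma pvFoldMax_spec :
    ∀ (t : List (Int × Int)) (m : Int) (i : Int),
    pvFoldMax (some m, i) t
      = (some ((t.map Prod.snd).foldl max m),
         if m < (t.map Prod.snd).foldl max m
           then pvFirstIdxMax t ((t.map Prod.snd).foldl max m) else i) := by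
  intro t
  induction t with
  | nil => intro m i; simp [pvFoldMax]
  | cons p t ih =>
    intro m i
    have hle : max m p.2 ≤ (t.map Prod.snd).foldl max (max m p.2) :=
      pvFoldlMax_ge _ _ _ (by simp)
    by_cases hp : m < p.2
    · have h1 : pvFoldMax (some m, i) (p :: t) = pvFoldMax (some p.2, p.1) t := by
        simp [pvFoldMax, pvGtNegInf, hp]
      rw [h1, ih]
      have hmax : max m p.2 = p.2 := by omega
      rw [List.map_cons, List.foldl_cons, hmax]
      have hv : p.2 ≤ (t.map Prod.snd).foldl max p.2 := by rw [← hmax]; exact hle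
      by_cases hvp : p.2 < (t.map Prod.snd).foldl max p.2
      · have h2 : ¬ ((t.map Prod.snd).foldl max p.2 ≤ p.2) := by omega
        simp [pvFirstIdxMax, h2, hvp, show m < (t.map Prod.snd).foldl max p.2 by omega]
      · have hv2 : (t.map Prod.snd).foldl max p.2 = p.2 := by omega
        simp [pvFirstIdxMax, hv2, hp]
    · have h1 : pvFoldMax (some m, i) (p :: t) = pvFoldMax (some m, i) t := by
        simp [pvFoldMax, pvGtNegInf, hp]
      rw [h1, ih]
      have hmax : max m p.2 = m := by omega
      rw [List.map_cons, List.foldl_cons, hmax]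
      by_cases hvm : m < (t.map Prod.snd).foldl max m
      · have h2 : ¬ ((t.map Prod.snd).foldl max m ≤ p.2) := by omega
        simp [pvFirstIdxMax, h2, hvm]
      · simp [hvm]

lemma pvFoldMin_head (q : Int × Int) (t : List (Int × Int)) (b : Int) :
    pvFoldMin (none, b) (q :: t)
      = (some ((t.map Prod.snd).foldl min q.2),
         pvFirstIdxMin (q :: t) ((t.map Prod.snd).foldl min q.2)) := by
  have hstep : pvFoldMin (none, b) (q :: t) = pvFoldMin (some q.2, q.1) t := by
    simp [pvFoldMin, pvLtInf]
  rw [hstep, pvFoldMin_spec]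
  have hle : (t.map Prod.snd).foldl min q.2 ≤ q.2 := pvFoldlMin_le _ _ _ (by simp)
  by_cases h : (t.map Prod.snd).foldl min q.2 < q.2
  · rw [if_pos h]
    unfold pvFirstIdxMin
    rw [List.find?_cons_of_neg (by simp; omega)]
  · rw [if_neg h]
    have he : q.2 = (t.map Prod.snd).foldl min q.2 := by omega
    unfold pvFirstIdxMin
    rw [List.find?_cons_of_pos (by simp; omega)]
    rfl

lemma pvFoldMax_head (q : Int × Int) (t : List (Int × Int)) (b : Int) :
    pvFoldMax (none, b) (q :: t)
      = (some ((t.map Prod.snd).foldl max q.2),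
         pvFirstIdxMax (q :: t) ((t.map Prod.snd).foldl max q.2)) := by
  have hstep : pvFoldMax (none, b) (q :: t) = pvFoldMax (some q.2, q.1) t := by
    simp [pvFoldMax, pvGtNegInf]
  rw [hstep, pvFoldMax_spec]
  have hle : q.2 ≤ (t.map Prod.snd).foldl max q.2 := pvFoldlMax_ge _ _ _ (by simp)
  by_cases h : q.2 < (t.map Prod.snd).foldl max q.2
  · rw [if_pos h]
    unfold pvFirstIdxMax
    rw [List.find?_cons_of_neg (by simp; omega)]
  · rw [if_neg h]
    unfold pvFirstIdxMax
    rw [List.find?_cons_of_pos (by simp; omega)]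
    rfl

-- A's scan over enumerate(nums) with the current deleted set, in terms of the remaining pairs
lemma pvScan_eq (nums : List Int) (deleted : PySem.Set Int) (q : Int × Int) (t : List (Int × Int))
    (hrem : pvRem nums deleted = q :: t) :
    (PySem.List.enumerate nums).foldl (pvScanStep deleted) (none, -1, none, -1)
      = (some ((t.map Prod.snd).foldl min q.2),
         pvFirstIdxMin (q :: t) ((t.map Prod.snd).foldl min q.2),
         some ((t.map Prod.snd).foldl max q.2),
         pvFirstIdxMax (q :: t) ((t.map Prod.snd).foldl max q.2)) := by
  have hall : ∀ p ∈ q :: t, PySem.Set.contains deleted p.1 = false := by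
    intro p hp
    rw [← hrem] at hp
    have := List.of_mem_filter hp
    simpa using this
  rw [pvScan_skip]
  rw [show (PySem.List.enumerate nums).filter (fun p => !PySem.Set.contains deleted p.1)
        = q :: t from hrem]
  rw [pvScan_split _ deleted _ _ _ _ hall, pvFoldMin_head, pvFoldMax_head]

lemma pvFindMin_decomp (rem : List (Int × Int)) (m : Int)
    (hPW : rem.Pairwise (fun p q => p.1 ≠ q.1))
    (hmem : m ∈ rem.map Prod.snd) (hmin : ∀ x ∈ rem.map Prod.snd, m ≤ x) :
    ∃ l1 p l2, rem = l1 ++ p :: l2 ∧ p.2 = m ∧ pvFirstIdxMin rem m = p.1 ∧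
      rem.filter (fun x => decide (x.1 ≠ p.1)) = l1 ++ l2 ∧
      (rem.map Prod.snd).erase m = (l1 ++ l2).map Prod.snd := by
  obtain ⟨p0, hp0mem, hp0⟩ := List.mem_map.1 hmem
  have hfind : ∃ p, rem.find? (fun p => decide (p.2 ≤ m)) = some p := by
    rcases hfe : rem.find? (fun p => decide (p.2 ≤ m)) with _ | p
    · exact absurd (List.find?_eq_none.1 hfe p0 hp0mem) (by simp [hp0])
    · exact ⟨p, hfe⟩
  obtain ⟨p, hp⟩ := hfind
  obtain ⟨hple, l1, l2, hsplit, hl1⟩ := List.find?_eq_some_iff_append.1 hp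
  have hpm : p.2 = m := le_antisymm (by simpa using hple)
    (hmin _ (List.mem_map.2 ⟨p, by simp [hsplit], rfl⟩))
  have hl1' : ∀ x ∈ l1, m < x.2 := by
    intro x hx
    have h1 := hl1 x hx
    have h2 := hmin x.2 (List.mem_map.2 ⟨x, by simp [hsplit, hx], rfl⟩)
    simp at h1
    omega
  have hne : ∀ x ∈ l1 ++ l2, x.1 ≠ p.1 := by
    intro x hx
    have hxr : x ∈ rem := by
      rw [hsplit]; rcases List.mem_append.1 hx with h | h
      · exact List.mem_append.2 (Or.inl h)
      · exact List.mem_append.2 (Or.inr (by simp [h]))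
    have hpr : p ∈ rem := by rw [hsplit]; simp
    have hxp : x ≠ p := by
      rintro rfl
      rw [hsplit] at hPW
      rcases List.mem_append.1 hx with h | h
      · exact (List.pairwise_append.1 hPW).2.2 x h x (by simp) rfl
      · have := List.pairwise_cons.1 (List.pairwise_append.1 hPW).2.1
        exact this.1 x h rfl
    exact List.Pairwise.forall (fun a b h hba => h hba.symm) hPW hxr hpr hxp
  refine ⟨l1, p, l2, hsplit, hpm, ?_, ?_, ?_⟩
  · simp [pvFirstIdxMin, hp]
  · rw [hsplit, List.filter_append, List.filter_cons]
    simp only [ne_eq, not_true_eq_false, decide_false]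
    rw [List.filter_eq_self.2 (fun x hx => by simpa using hne x (List.mem_append.2 (Or.inl hx))),
        List.filter_eq_self.2 (fun x hx => by simpa using hne x (List.mem_append.2 (Or.inr hx)))]
    simp
  · rw [hsplit]
    simp only [List.map_append, List.map_cons]
    rw [List.erase_append_right _ (by
      intro hc
      obtain ⟨x, hx, hx2⟩ := List.mem_map.1 hc
      have := hl1' x hx
      omega)]
    rw [hpm, List.erase_cons_head]

lemma pvFindMax_decomp (rem : List (Int × Int)) (M : Int)
    (hPW : rem.Pairwise (fun p q => p.1 ≠ q.1))
    (hmem : M ∈ rem.map Prod.snd) (hmax : ∀ x ∈ rem.map Prod.snd, x ≤ M) :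
    ∃ l1 p l2, rem = l1 ++ p :: l2 ∧ p.2 = M ∧ pvFirstIdxMax rem M = p.1 ∧
      rem.filter (fun x => decide (x.1 ≠ p.1)) = l1 ++ l2 ∧
      (rem.map Prod.snd).erase M = (l1 ++ l2).map Prod.snd := by
  obtain ⟨p0, hp0mem, hp0⟩ := List.mem_map.1 hmem
  have hfind : ∃ p, rem.find? (fun p => decide (M ≤ p.2)) = some p := by
    rcases hfe : rem.find? (fun p => decide (M ≤ p.2)) with _ | p
    · exact absurd (List.find?_eq_none.1 hfe p0 hp0mem) (by simp [hp0])
    · exact ⟨p, hfe⟩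
  obtain ⟨p, hp⟩ := hfind
  obtain ⟨hple, l1, l2, hsplit, hl1⟩ := List.find?_eq_some_iff_append.1 hp
  have hpm : p.2 = M := le_antisymm
    (hmax _ (List.mem_map.2 ⟨p, by simp [hsplit], rfl⟩)) (by simpa using hple)
  have hl1' : ∀ x ∈ l1, x.2 < M := by
    intro x hx
    have h1 := hl1 x hx
    have h2 := hmax x.2 (List.mem_map.2 ⟨x, by simp [hsplit, hx], rfl⟩)
    simp at h1
    omega
  have hne : ∀ x ∈ l1 ++ l2, x.1 ≠ p.1 := by
    intro x hx
    have hxr : x ∈ rem := by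
      rw [hsplit]; rcases List.mem_append.1 hx with h | h
      · exact List.mem_append.2 (Or.inl h)
      · exact List.mem_append.2 (Or.inr (by simp [h]))
    have hpr : p ∈ rem := by rw [hsplit]; simp
    have hxp : x ≠ p := by
      rintro rfl
      rw [hsplit] at hPW
      rcases List.mem_append.1 hx with h | h
      · exact (List.pairwise_append.1 hPW).2.2 x h x (by simp) rfl
      · have := List.pairwise_cons.1 (List.pairwise_append.1 hPW).2.1
        exact this.1 x h rfl
    exact List.Pairwise.forall (fun a b h hba => h hba.symm) hPW hxr hpr hxp
  refine ⟨l1, p, l2, hsplit, hpm, ?_, ?_, ?_⟩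
  · simp [pvFirstIdxMax, hp]
  · rw [hsplit, List.filter_append, List.filter_cons]
    simp only [ne_eq, not_true_eq_false, decide_false]
    rw [List.filter_eq_self.2 (fun x hx => by simpa using hne x (List.mem_append.2 (Or.inl hx))),
        List.filter_eq_self.2 (fun x hx => by simpa using hne x (List.mem_append.2 (Or.inr hx)))]
    simp
  · rw [hsplit]
    simp only [List.map_append, List.map_cons]
    rw [List.erase_append_right _ (by
      intro hc
      obtain ⟨x, hx, hx2⟩ := List.mem_map.1 hc
      have := hl1' x hx
      omega)]
    rw [hpm, List.erase_cons_head]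

lemma pvFoldlMin_perm (t t' : List Int) (a a' : Int) (h : (a :: t).Perm (a' :: t')) :
    t.foldl min a = t'.foldl min a' :=
  le_antisymm (pvFoldlMin_le t a _ (h.symm.mem_iff.1 (pvFoldlMin_mem t' a')))
    (pvFoldlMin_le t' a' _ (h.mem_iff.1 (pvFoldlMin_mem t a)))
lemma pvFoldlMax_perm (t t' : List Int) (a a' : Int) (h : (a :: t).Perm (a' :: t')) :
    t.foldl max a = t'.foldl max a' :=
  le_antisymm (pvFoldlMax_ge t' a' _ (h.mem_iff.1 (pvFoldlMax_mem t a)))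
    (pvFoldlMax_ge t a _ (h.symm.mem_iff.1 (pvFoldlMax_mem t' a')))

lemma pvS_perm : ∀ (n : Nat) (l l' : List Int), l.length ≤ n → l.Perm l' → pvS l = pvS l' := by
  intro n
  induction n with
  | zero =>
    intro l l' hl hperm
    have h0 : l = [] := List.length_eq_zero_iff.1 (Nat.le_zero.1 hl)
    subst h0
    rw [hperm.symm.eq_nil]
  | succ n ih =>
    intro l l' hl hperm
    cases l with
    | nil => rw [hperm.symm.eq_nil]
    | cons a t =>
      cases l' with
      | nil => exact absurd hperm.length_eq (by simp)
      | cons b t' =>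
        have hmin := pvFoldlMin_perm t t' a b hperm
        have hmax := pvFoldlMax_perm t t' a b hperm
        rw [pvS_cons, pvS_cons, hmin, hmax]
        have hmem : t.foldl min a ∈ a :: t := pvFoldlMin_mem t a
        have hlen1 : ((a :: t).erase (t.foldl min a)).length ≤ n := by
          rw [List.length_erase_of_mem hmem]
          simpa using Nat.le_of_succ_le_succ (by simpa using hl)
        by_cases hmM : List.foldl min b t' = List.foldl max b t'
        · rw [if_pos hmM, if_pos hmM]
          congr 1
          exact ih _ _ (hmin ▸ hlen1) (hperm.erase _)
        · rw [if_neg hmM, if_neg hmM]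
          congr 1
          exact ih _ _ (le_trans List.length_erase_le (hmin ▸ hlen1)) ((hperm.erase _).erase _)

lemma pvMem_zipWith {α : Type} (f : α → α → α) :
    ∀ (l l2 : List α) (x : α), x ∈ List.zipWith f l l2 → ∃ a ∈ l, ∃ b ∈ l2, f a b = x := by
  intro l
  induction l with
  | nil => intro l2 x hx; simp at hx
  | cons a t ih =>
    intro l2 x hx
    cases l2 with
    | nil => simp at hx
    | cons b t2 =>
      rcases (by simpa using hx : x = f a b ∨ x ∈ List.zipWith f t t2) with h | h
      · exact ⟨a, by simp, b, by simp, h.symm⟩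
      · obtain ⟨a', ha', b', hb', he⟩ := ih t2 x h
        exact ⟨a', by simp [ha'], b', by simp [hb'], he⟩

lemma pvLe_getLast : ∀ (l : List Int), l.Pairwise (· ≤ ·) → ∀ x ∈ l, ∀ (hne : l ≠ []),
    x ≤ l.getLast hne := by
  intro l
  induction l with
  | nil => simp
  | cons a t ih =>
    intro hp x hx hne
    rcases List.pairwise_cons.1 hp with ⟨ha, hpt⟩
    cases t with
    | nil =>
      have hxa : x = a := by simpa using hx
      simp [hxa]
    | cons b t2 =>
      rw [List.getLast_cons (by simp)]
      rcases (by simpa using hx : x = a ∨ x ∈ b :: t2) with h | h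
      · subst h
        exact le_trans (ha _ (by simp)) (ih hpt b (by simp) (by simp))
      · exact ih hpt x h (by simp)

lemma pvToFinset_const (c : Int) : ∀ (l : List Int), l ≠ [] → (∀ x ∈ l, x = c) →
    l.toFinset = {c} := by
  intro l
  induction l with
  | nil => simp
  | cons a t ih =>
    intro _ hall
    have ha : a = c := hall a (by simp)
    cases t with
    | nil => simp [ha]
    | cons b t2 =>
      rw [List.toFinset_cons, ih (by simp) (fun x hx => hall x (by simp [hx])), ha]
      simp

lemma pvFoldlMin_sorted (a : Int) (t : List Int) (h : (a :: t).Pairwise (· ≤ ·)) :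
    t.foldl min a = a :=
  le_antisymm (pvFoldlMin_le t a a (by simp))
    (by
      rcases List.pairwise_cons.1 h with ⟨ha, -⟩
      rcases (by simpa using pvFoldlMin_mem t a : t.foldl min a = a ∨ t.foldl min a ∈ t) with he | he
      · omega
      · exact ha _ he)

lemma pvFoldlMax_sorted (a : Int) (t : List Int) (h : (a :: t).Pairwise (· ≤ ·)) (hne : t ≠ []) :
    t.foldl max a = t.getLast hne := by
  have hmem := pvFoldlMax_mem t a
  have hl : t.getLast hne ∈ a :: t := by
    simp [List.getLast_mem hne]
  exact le_antisymm
    (pvLe_getLast (a :: t) h _ hmem (by simp) |>.trans_eq (by rw [List.getLast_cons hne]))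
    (pvFoldlMax_ge t a _ hl)

lemma pvS_sorted :
    ∀ (n : Nat) (s : List Int), s.length ≤ n → s.Pairwise (· ≤ ·) →
    pvS s = (List.zipWith (fun a b => a + b) s s.reverse).toFinset := by
  intro n
  induction n with
  | zero =>
    intro s hl _
    have h0 : s = [] := List.length_eq_zero_iff.1 (Nat.le_zero.1 hl)
    subst h0; simp [pvS]
  | succ n ih =>
    intro s hl hsort
    cases s with
    | nil => simp [pvS]
    | cons a t =>
      by_cases htne : t = []
      · subst htne
        rw [pvS_cons]
        simp [pvS]
      · have hM : t.getLast htne ∈ t := List.getLast_mem htne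
        set M := t.getLast htne with hMdef
        have hmin := pvFoldlMin_sorted a t hsort
        have hmax : t.foldl max a = M := pvFoldlMax_sorted a t hsort htne
        have hsort_t : t.Pairwise (· ≤ ·) := (List.pairwise_cons.1 hsort).2
        have hlt : t.length ≤ n := by simpa using hl
        have hle_all : ∀ x ∈ a :: t, x ≤ M := by
          intro x hx
          exact (pvLe_getLast (a :: t) hsort x hx (by simp)).trans_eq
            (by rw [List.getLast_cons htne])
        rw [pvS_cons, hmin, hmax, List.erase_cons_head]
        by_cases haM : a = M
        · rw [if_pos haM]
          have hall : ∀ x ∈ a :: t, x = a := by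
            intro x hx
            have h1 : a ≤ x := by
              rcases (by simpa using hx) with h | h
              · omega
              · exact (List.pairwise_cons.1 hsort).1 x h
            have h2 : x ≤ M := hle_all x hx
            omega
          have hzip1 : ∀ x ∈ List.zipWith (fun a b => a + b) t t.reverse, x = a + a := by
            intro x hx
            obtain ⟨y, hy, z, hz, he⟩ := pvMem_zipWith _ _ _ _ hx
            rw [← he, hall y (by simp [hy]), hall z (by simp [List.mem_reverse.1 hz])]
          have hzip2 : ∀ x ∈ List.zipWith (fun a b => a + b) (a :: t) (a :: t).reverse,
              x = a + a := by
            intro x hx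
            obtain ⟨y, hy, z, hz, he⟩ := pvMem_zipWith _ _ _ _ hx
            rw [← he, hall y hy, hall z (List.mem_reverse.1 hz)]
          rw [ih t hlt hsort_t]
          rw [pvToFinset_const (a + a) _ (by
                simp [List.zipWith_eq_nil_iff, htne]) hzip1,
              pvToFinset_const (a + a) _ (by
                simp [List.zipWith_eq_nil_iff]) hzip2]
          rw [← haM]
          simp
        · rw [if_neg (fun h => haM h)]
          have hu : t.dropLast ++ [M] = t := List.dropLast_append_getLast htne
          have hperm : (t.erase M).Perm t.dropLast := by
            have h1 : t.Perm (M :: t.erase M) := List.perm_cons_erase hM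
            have h2 : t.Perm (M :: t.dropLast) := by
              conv_lhs => rw [← hu]
              exact List.perm_append_singleton M t.dropLast
            exact (h1.symm.trans h2).cons_inv
          have hlenu : t.dropLast.length ≤ n := by
            have := List.length_dropLast (xs := t)
            omega
          have hsortu : t.dropLast.Pairwise (· ≤ ·) :=
            List.Pairwise.sublist (List.dropLast_sublist t) hsort_t
          rw [pvS_perm n _ _ (by
              have h3 : (t.erase M).length ≤ t.length := List.length_erase_le
              omega) hperm,
            ih t.dropLast hlenu hsortu]
          have hrev : (a :: t).reverse = (M :: t.dropLast.reverse) ++ [a] := by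
            conv_lhs => rw [← hu]
            simp
          conv_rhs => rw [hrev, show a :: t = (a :: t.dropLast) ++ [M] from by
            (conv_lhs => rw [← hu]); rfl]
          rw [List.zipWith_append (by simp)]
          simp only [List.zipWith]
          ext x
          simp [List.mem_toFinset]
          constructor
          · rintro (h | h)
            · exact Or.inl h
            · exact Or.inr (Or.inr h)
          · rintro (h | h | h)
            · exact Or.inl h
            · exact Or.inl (by omega)
            · exact Or.inr h

lemma pvToFinset_add (s : PySem.Set Int) (x : Int) :
    (PySem.Set.add s x).toFinset = insert x s.toFinset := by
  by_cases h : x ∈ s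
  · rw [PySem.Set.add_of_mem h]
    exact (Finset.insert_eq_self.2 (List.mem_toFinset.2 h)).symm
  · rw [PySem.Set.add_of_not_mem h, List.toFinset_append]
    ext y
    simp

lemma pvUnion_insert (A B : Finset Int) (x : Int) : insert x A ∪ B = A ∪ insert x B := by
  ext y
  simp

lemma pvNotMem_of_contains_false (s : PySem.Set Int) (x : Int)
    (h : PySem.Set.contains s x = false) : x ∉ s := by
  intro hm
  have h2 := (PySem.Set.contains_iff s x).2 hm
  rw [h] at h2
  exact Bool.false_ne_true h2

lemma pvRem_add (nums : List Int) (deleted : PySem.Set Int) (i j : Int) :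
    pvRem nums (PySem.Set.add (PySem.Set.add deleted i) j)
      = (pvRem nums deleted).filter (fun p => decide (p.1 ≠ i) && decide (p.1 ≠ j)) := by
  unfold pvRem
  rw [List.filter_filter]
  apply List.filter_congr
  intro p _
  by_cases hd : p.1 ∈ deleted
  · have h1 : PySem.Set.contains deleted p.1 = true := (PySem.Set.contains_iff _ _).2 hd
    have h2 : PySem.Set.contains (PySem.Set.add (PySem.Set.add deleted i) j) p.1 = true :=
      (PySem.Set.contains_iff _ _).2
        ((PySem.Set.mem_add _ _ _).2 (Or.inl ((PySem.Set.mem_add _ _ _).2 (Or.inl hd))))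
    rw [h1, h2]
    simp
  · have h1 : PySem.Set.contains deleted p.1 = false := by
      rcases hb : PySem.Set.contains deleted p.1 with _ | _
      · rfl
      · exact absurd ((PySem.Set.contains_iff _ _).1 hb) hd
    rw [h1]
    by_cases hi : p.1 = i
    · have h2 : PySem.Set.contains (PySem.Set.add (PySem.Set.add deleted i) j) p.1 = true :=
        (PySem.Set.contains_iff _ _).2
          ((PySem.Set.mem_add _ _ _).2 (Or.inl ((PySem.Set.mem_add _ _ _).2 (Or.inr hi))))
      rw [h2]
      simp [hi]
    · by_cases hj : p.1 = j
      · have h2 : PySem.Set.contains (PySem.Set.add (PySem.Set.add deleted i) j) p.1 = true :=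
          (PySem.Set.contains_iff _ _).2 ((PySem.Set.mem_add _ _ _).2 (Or.inr hj))
        rw [h2]
        simp [hj]
      · have hnm : p.1 ∉ PySem.Set.add (PySem.Set.add deleted i) j := by
          intro hm
          rcases (PySem.Set.mem_add _ _ _).1 hm with hm | hm
          · rcases (PySem.Set.mem_add _ _ _).1 hm with hm | hm
            · exact hd hm
            · exact hi hm
          · exact hj hm
        have h2 : PySem.Set.contains (PySem.Set.add (PySem.Set.add deleted i) j) p.1 = false := by
          rcases hb : PySem.Set.contains (PySem.Set.add (PySem.Set.add deleted i) j) p.1 with _ | _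
          · rfl
          · exact absurd ((PySem.Set.contains_iff _ _).1 hb) hnm
        rw [h2]
        simp [hi, hj]

lemma pvRem_pairwise (nums : List Int) (deleted : PySem.Set Int) :
    (pvRem nums deleted).Pairwise (fun p q => p.1 ≠ q.1) :=
  (List.Pairwise.sublist List.filter_sublist
    (PySem.List.pairwise_lt_enumerate nums 0)).imp (fun h => ne_of_lt h)

lemma pvLoopA_spec (nums : List Int) :
    ∀ (fuel : Nat) (distinct deleted : PySem.Set Int),
    distinct.Nodup →
    (pvRem nums deleted).length + deleted.length = nums.length →
    (pvRem nums deleted).length ≤ fuel →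
    pvLoopA nums fuel distinct deleted
      = ((distinct.toFinset ∪ pvS ((pvRem nums deleted).map Prod.snd)).card : Int) := by
  intro fuel
  induction fuel with
  | zero =>
    intro distinct deleted hnd hinv hle
    have h0 : pvRem nums deleted = [] := List.length_eq_zero_iff.1 (Nat.le_zero.1 hle)
    rw [pvLoopA, h0]
    show (distinct.length : Int) = _
    rw [show pvS (([] : List (Int × Int)).map Prod.snd) = ∅ from by simp [pvS]]
    rw [Finset.union_empty, List.toFinset_card_of_nodup hnd]
  | succ fuel ih =>
    intro distinct deleted hnd hinv hle
    rcases hrem : pvRem nums deleted with _ | ⟨q, t⟩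
    · rw [pvLoopA]
      have hlen : deleted.length = nums.length := by
        rw [hrem] at hinv; simpa using hinv
      rw [if_neg (by
        show ¬ ((deleted.length : Int) < (nums.length : Int))
        omega)]
      show (distinct.length : Int) = _
      rw [show pvS (([] : List (Int × Int)).map Prod.snd) = ∅ from by simp [pvS]]
      rw [Finset.union_empty, List.toFinset_card_of_nodup hnd]
    · -- one pass of the while loop
      have hPW : (q :: t).Pairwise (fun p q => p.1 ≠ q.1) := hrem ▸ pvRem_pairwise nums deleted
      have hall : ∀ p ∈ q :: t, PySem.Set.contains deleted p.1 = false := by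
        intro p hp
        rw [← hrem] at hp
        simpa using List.of_mem_filter hp
      have hlen : (q :: t).length + deleted.length = nums.length := by rw [← hrem]; exact hinv
      rw [pvLoopA]
      rw [if_pos (by
        show ((deleted.length : Int) < (nums.length : Int))
        simp at hlen
        omega)]
      rw [pvScan_eq nums deleted q t hrem]
      set m := (t.map Prod.snd).foldl min q.2 with hmdef
      set M := (t.map Prod.snd).foldl max q.2 with hMdef
      set i := pvFirstIdxMin (q :: t) m with hidef
      set j := pvFirstIdxMax (q :: t) M with hjdef
      simp only [Option.getD_some]
      -- facts about m and M over the remaining values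
      have hvm_mem : m ∈ (q :: t).map Prod.snd := by
        simpa using pvFoldlMin_mem (t.map Prod.snd) q.2
      have hvM_mem : M ∈ (q :: t).map Prod.snd := by
        simpa using pvFoldlMax_mem (t.map Prod.snd) q.2
      have hvm_min : ∀ x ∈ (q :: t).map Prod.snd, m ≤ x := by
        intro x hx
        exact pvFoldlMin_le (t.map Prod.snd) q.2 x (by simpa using hx)
      have hvM_max : ∀ x ∈ (q :: t).map Prod.snd, x ≤ M := by
        intro x hx
        exact pvFoldlMax_ge (t.map Prod.snd) q.2 x (by simpa using hx)
      obtain ⟨l1, pmin, l2, hsplit, hpmin2, hpmin1, hfilter_i, herase_m⟩ :=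
        pvFindMin_decomp (q :: t) m hPW hvm_mem hvm_min
      have hi_pmin : i = pmin.1 := hpmin1.symm ▸ rfl
      have hpmin_mem : pmin ∈ q :: t := by rw [hsplit]; simp
      have hi_not_del : pmin.1 ∉ deleted :=
        pvNotMem_of_contains_false deleted pmin.1 (hall pmin hpmin_mem)
      -- the sum set recursion on the remaining values
      have hScons : pvS ((q :: t).map Prod.snd)
          = insert (m + M)
              (pvS (if m = M then (((q :: t).map Prod.snd).erase m)
                    else ((((q :: t).map Prod.snd).erase m).erase M))) := by
        rw [List.map_cons, pvS_cons]
      by_cases hmM : m = M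
      · -- all remaining values are equal: Python deletes a single index
        have hq2 : q.2 = m :=
          le_antisymm (hmM ▸ hvM_max q.2 (by simp)) (hvm_min q.2 (by simp))
        have hiq : i = q.1 := by
          rw [hidef]
          unfold pvFirstIdxMin
          rw [List.find?_cons_of_pos (by simp [hq2])]
          rfl
        have hjq : j = q.1 := by
          rw [hjdef]
          unfold pvFirstIdxMax
          rw [List.find?_cons_of_pos (by simp [hq2, hmM])]
          rfl
        have hq_not_del : q.1 ∉ deleted :=
          pvNotMem_of_contains_false deleted q.1 (hall q (by simp))
        have hdel2 : PySem.Set.add (PySem.Set.add deleted i) j = deleted ++ [q.1] := by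
          rw [hiq, hjq, PySem.Set.add_of_not_mem hq_not_del]
          exact PySem.Set.add_of_mem (by simp)
        have hrem' : pvRem nums (PySem.Set.add (PySem.Set.add deleted i) j) = t := by
          rw [pvRem_add, hrem, List.filter_cons]
          rw [hiq, hjq]
          simp only [ne_eq, not_true_eq_false, decide_false, Bool.and_self, Bool.false_eq_true,
            if_false]
          exact List.filter_eq_self.2 (fun p hp => by
            have := (List.pairwise_cons.1 hPW).1 p hp
            simp [this.symm])
        rw [ih _ _ (PySem.Set.nodup_add _ _ hnd) (by
            rw [hrem', hdel2]
            simp only [List.length_append, List.length_cons, List.length_nil]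
            simp at hlen ⊢
            omega) (by
            rw [hrem']
            rw [hrem] at hle
            simp only [List.length_cons] at hle
            omega)]
        rw [hrem', hScons, if_pos hmM]
        rw [show ((q :: t).map Prod.snd).erase m = t.map Prod.snd from by
          rw [List.map_cons, hq2, List.erase_cons_head]]
        rw [pvToFinset_add, pvUnion_insert]
      · -- two distinct indices are deleted
        have hmM' : m < M := by
          have := hvm_min M hvM_mem
          omega
        -- remove the first minimal pair
        have hrem1_pw : (l1 ++ l2).Pairwise (fun p q => p.1 ≠ q.1) := by
          rw [← hfilter_i]
          exact List.Pairwise.sublist List.filter_sublist hPW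
        have hM_mem1 : M ∈ (l1 ++ l2).map Prod.snd := by
          rw [← herase_m]
          exact (List.mem_erase_of_ne (by omega)).2 hvM_mem
        have hM_max1 : ∀ x ∈ (l1 ++ l2).map Prod.snd, x ≤ M := by
          intro x hx
          rw [← herase_m] at hx
          exact hvM_max x (List.mem_of_mem_erase hx)
        obtain ⟨k1, pmax, k2, hsplit2, hpmax2, hpmax1, hfilter_j, herase_M⟩ :=
          pvFindMax_decomp (l1 ++ l2) M hrem1_pw hM_mem1 hM_max1
        -- the first maximal pair is the same in rem and in rem \ pmin
        have hj_eq : j = pmax.1 := by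
          rw [hjdef, ← hpmax1]
          unfold pvFirstIdxMax
          rw [hsplit, List.find?_append, List.find?_cons_of_neg (by simp; omega),
            ← List.find?_append]
        have hpmax_mem1 : pmax ∈ l1 ++ l2 := by rw [hsplit2]; simp
        have hpmax_mem : pmax ∈ q :: t := by
          rw [← hfilter_i] at hpmax_mem1
          exact List.mem_of_mem_filter hpmax_mem1
        have hj_ne_i : pmax.1 ≠ pmin.1 := by
          rw [← hfilter_i] at hpmax_mem1
          simpa using List.of_mem_filter hpmax_mem1
        have hj_not_del : pmax.1 ∉ deleted :=
          pvNotMem_of_contains_false deleted pmax.1 (hall pmax hpmax_mem)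
        have hdel2 : PySem.Set.add (PySem.Set.add deleted i) j
            = deleted ++ [pmin.1] ++ [pmax.1] := by
          rw [hi_pmin, hj_eq, PySem.Set.add_of_not_mem hi_not_del]
          exact PySem.Set.add_of_not_mem (by
            simp only [List.mem_append, List.mem_singleton]
            rintro (h | h)
            · exact hj_not_del h
            · exact hj_ne_i h)
        have hrem' : pvRem nums (PySem.Set.add (PySem.Set.add deleted i) j) = k1 ++ k2 := by
          rw [pvRem_add, hrem, hi_pmin, hj_eq]
          rw [show (fun (p : Int × Int) => decide (p.1 ≠ pmin.1) && decide (p.1 ≠ pmax.1))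
              = (fun p => decide (p.1 ≠ pmax.1) && decide (p.1 ≠ pmin.1)) from by
            funext p; exact Bool.and_comm _ _]
          rw [← List.filter_filter, hfilter_i, hfilter_j]
        have hlen1 : (l1 ++ l2).length + 1 = (q :: t).length := by
          rw [hsplit]
          simp
          omega
        have hlen2 : (k1 ++ k2).length + 1 = (l1 ++ l2).length := by
          rw [hsplit2]
          simp
          omega
        rw [ih _ _ (PySem.Set.nodup_add _ _ hnd) (by
            rw [hrem', hdel2]
            simp only [List.length_append, List.length_cons, List.length_nil]
            simp at hlen hlen1 hlen2 ⊢
            omega) (by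
            rw [hrem']
            rw [hrem] at hle
            simp only [List.length_append, List.length_cons] at hle hlen1 hlen2 ⊢
            omega)]
        rw [hrem', hScons, if_neg hmM]
        rw [show (((q :: t).map Prod.snd).erase m).erase M = (k1 ++ k2).map Prod.snd from by
          rw [herase_m, herase_M]]
        rw [pvToFinset_add, pvUnion_insert]

-- ===== VERDICT (by name: the statement is the Claim_ definition above) =====
theorem distinctAverages_spec : Claim_equal_distinctAverages := by
  intro nums _
  unfold Spec_distinctAverages distinctAverages distinctAverages_alt
  have hrem0 : pvRem nums PySem.Set.empty = PySem.List.enumerate nums := by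
    unfold pvRem
    exact List.filter_eq_self.2 (fun p _ => by simp [PySem.Set.empty, PySem.Set.contains])
  rw [pvLoopA_spec nums nums.length PySem.Set.empty PySem.Set.empty List.nodup_nil
    (by rw [hrem0]; simp [PySem.List.length_enumerate, PySem.Set.empty])
    (by rw [hrem0]; simp [PySem.List.length_enumerate])]
  rw [hrem0, PySem.List.map_snd_enumerate]
  show ((_ ∪ pvS nums).card : Int) = _
  rw [show (PySem.Set.empty : PySem.Set Int).toFinset = (∅ : Finset Int) from rfl,
    Finset.empty_union]
  set s := PySem.List.sorted nums (fun x => x) false with hs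
  have h1 : pvS nums = pvS s :=
    pvS_perm nums.length nums s (le_refl _) (PySem.List.sorted_perm nums (fun x => x) false).symm
  have h2 : pvS s = (List.zipWith (fun a b => a + b) s s.reverse).toFinset :=
    pvS_sorted s.length s (le_refl _) (by
      simpa using PySem.List.sorted_pairwise nums (fun x => x))
  rw [h1, h2]
  show _ = (PySem.Set.len (PySem.Set.ofList (List.zipWith (fun a b => a + b) s s.reverse)) : Int)
  set z := List.zipWith (fun a b => a + b) s s.reverse with hz
  show ((z.toFinset.card : Nat) : Int) = ((PySem.Set.ofList z).length : Int)
  have h3 : z.toFinset = (PySem.Set.ofList z).toFinset := by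
    ext x
    simp [PySem.Set.mem_ofList]
  rw [h3, List.toFinset_card_of_nodup (PySem.Set.nodup_ofList z)]
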